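-- pv_equiv track=rewrite | github.com/acgovardhan/Blockchain_research | scripts/00_deploy_contracts.py | remove_duplicate_spdx
-- ===== SOURCE A (Python) =====
-- def remove_duplicate_spdx(source: str) -> str:
--     """Keep only the first SPDX line in a combined Solidity source."""
--     seen_spdx = False
--     cleaned_lines = []
--
--     for line in source.splitlines():
--         if line.strip().startswith("// SPDX-License-Identifier:"):
--             if seen_spdx:
--                 continue
--             seen_spdx = True
--         cleaned_lines.append(line)
--
--     return "\n".join(cleaned_lines)
-- ===== SOURCE B (Python) =====
-- def remove_duplicate_spdx(source: str) -> str: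
--     """Keep only the first SPDX line in a combined Solidity source."""
--     lines = source.splitlines()
--     spdx = [i for i, line in enumerate(lines)
--             if line.strip().startswith("// SPDX-License-Identifier:")]
--     drop = set(spdx[1:])
--     return "\n".join(line for i, line in enumerate(lines) if i not in drop)
-- ===== Notes on version B (the rewrite author's own statement) =====
-- stated objective: alternative
-- what changed: Replaces A's single pass with a running seen-flag by a two-phase index-table approach: first collect the indices of all SPDX lines, build a drop set of all but the first, then filter the enumerated lines by index membership.
import Mathlib
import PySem

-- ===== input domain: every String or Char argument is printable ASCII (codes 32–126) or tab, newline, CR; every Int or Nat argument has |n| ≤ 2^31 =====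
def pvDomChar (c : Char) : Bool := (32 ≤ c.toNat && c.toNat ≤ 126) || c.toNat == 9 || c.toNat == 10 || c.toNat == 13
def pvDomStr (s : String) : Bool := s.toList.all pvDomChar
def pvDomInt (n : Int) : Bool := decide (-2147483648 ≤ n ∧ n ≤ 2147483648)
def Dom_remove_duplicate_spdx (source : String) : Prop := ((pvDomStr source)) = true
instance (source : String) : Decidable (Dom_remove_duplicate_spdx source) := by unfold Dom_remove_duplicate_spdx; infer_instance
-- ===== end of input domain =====

-- B replaces A's running seen-flag pass by a two-phase index table (collect SPDX line
-- indices, drop all but the first, filter by index membership); same result, same cost.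


-- ===== PORT A =====
-- shared helper: the SPDX-line test 'line.strip().startswith("// SPDX-License-Identifier:")',
-- which appears verbatim in both Pythons
def pvIsSpdx (line : String) : Bool :=
  PySem.Str.startswith (PySem.Str.strip line) "// SPDX-License-Identifier:"

def remove_duplicate_spdx (source : String) : String :=
  let r := (PySem.Str.splitlines source).foldl
    (fun (st : Bool × List String) line =>
      if pvIsSpdx line then
        if st.1 then st            -- continue
        else (true, st.2 ++ [line])
      else (st.1, st.2 ++ [line]))
    (false, [])
  PySem.Str.join "\n" r.2

-- ===== PORT B =====
def remove_duplicate_spdx_alt (source : String) : String :=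
  let lines := PySem.Str.splitlines source
  let spdx := ((PySem.List.enumerate lines).filter (fun p => pvIsSpdx p.2)).map (fun p => p.1)
  let drop := PySem.Set.ofList (PySem.List.slice spdx (some 1) none)
  PySem.Str.join "\n"
    (((PySem.List.enumerate lines).filter (fun p => !(PySem.Set.contains drop p.1))).map
      (fun p => p.2))

-- ===== PRECONDITION & SPEC =====
def Spec_remove_duplicate_spdx (source : String) (out : String) : Prop := out = remove_duplicate_spdx_alt source
instance (source : String) (out : String) : Decidable (Spec_remove_duplicate_spdx source out) := by unfold Spec_remove_duplicate_spdx; infer_instance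

-- ===== CLAIM (what is proved, stated in full; the proofs are below) =====
def Claim_equal_remove_duplicate_spdx : Prop := ∀ (source : String), Dom_remove_duplicate_spdx source → Spec_remove_duplicate_spdx source (remove_duplicate_spdx source)

-- ===== LEMMAS AND PROOFS =====

-- proof-side characterisation of A's kept lines
def keepA : Bool → List String → List String
  | _, [] => []
  | seen, l :: ls =>
    if pvIsSpdx l then (if seen then keepA true ls else l :: keepA true ls)
    else l :: keepA seen ls

-- first SPDX index of a list enumerated from s
def spdxFirst : Int → List String → Option Int
  | _, [] => none
  | s, l :: ls => if pvIsSpdx l then some s else spdxFirst (s + 1) ls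

lemma foldA_eq_keepA (ls : List String) : ∀ (seen : Bool) (acc : List String),
    (ls.foldl
      (fun (st : Bool × List String) line =>
        if pvIsSpdx line then
          if st.1 then st else (true, st.2 ++ [line])
        else (st.1, st.2 ++ [line]))
      (seen, acc)).2 = acc ++ keepA seen ls := by
  induction ls with
  | nil => intro seen acc; simp [keepA]
  | cons l ls ih =>
    intro seen acc
    by_cases h : pvIsSpdx l = true
    · cases seen with
      | false => simp [keepA, h, ih]
      | true => simp [keepA, h, ih]
    · simp [keepA, h, ih]

lemma keepA_cons_not_spdx (l : String) (ls : List String) (seen : Bool)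
    (h : ¬ pvIsSpdx l = true) : keepA seen (l :: ls) = l :: keepA seen ls := by
  cases seen <;> simp [keepA, h]

lemma fst_ge_of_mem_enumerate {α : Type} {p : Int × α} {ls : List α} {s : Int}
    (h : p ∈ PySem.List.enumerate ls s) : s ≤ p.1 := by
  rcases (PySem.List.mem_enumerate_iff ls s p).1 h with ⟨k, hk, rfl⟩
  simp

-- the generalized B-side filter equals keepA, for any drop set D pointwise described by
-- "SPDX line that is not the (still unseen) first one"
lemma filter_drop_eq_keepA (ls : List String) : ∀ (s : Int) (D : PySem.Set Int) (seen : Bool),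
    (∀ p ∈ PySem.List.enumerate ls s,
        (PySem.Set.contains D p.1 = true ↔
          (pvIsSpdx p.2 = true ∧ (seen = true ∨ spdxFirst s ls ≠ some p.1)))) →
    ((PySem.List.enumerate ls s).filter (fun p => !(PySem.Set.contains D p.1))).map
        (fun p => p.2) = keepA seen ls := by
  induction ls with
  | nil => intro s D seen _; simp [PySem.List.enumerate_nil, keepA]
  | cons l ls ih =>
    intro s D seen hD
    rw [PySem.List.enumerate_cons]
    have hhead := hD (s, l) (List.mem_cons_self)
    by_cases h : pvIsSpdx l = true
    · cases seen with
      | true =>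
        have hc : PySem.Set.contains D s = true := hhead.2 ⟨h, Or.inl rfl⟩
        rw [List.filter_cons_of_neg (by simp; exact (PySem.Set.contains_iff D s).1 hc)]
        rw [show keepA true (l :: ls) = keepA true ls from by simp [keepA, h]]
        exact ih (s + 1) D true (fun p hp => by
          have hmem := hD p (List.mem_cons_of_mem _ hp)
          constructor
          · intro hcp; exact ⟨(hmem.1 hcp).1, Or.inl rfl⟩
          · intro hsp; exact hmem.2 ⟨hsp.1, Or.inl rfl⟩)
      | false =>
        have hfst : spdxFirst s (l :: ls) = some s := by simp [spdxFirst, h]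
        have hc : ¬ PySem.Set.contains D s = true := by
          intro hcT
          rcases (hhead.1 hcT).2 with hfalse | hne
          · exact Bool.false_ne_true hfalse
          · exact hne (by rw [hfst])
        rw [List.filter_cons_of_pos (by simp; exact fun hm => hc ((PySem.Set.contains_iff D s).2 hm)), List.map_cons]
        rw [show keepA false (l :: ls) = l :: keepA true ls from by simp [keepA, h]]
        refine congrArg (fun t => l :: t) ?_
        exact ih (s + 1) D true (fun p hp => by
          have hmem := hD p (List.mem_cons_of_mem _ hp)
          have hge : s + 1 ≤ p.1 := fst_ge_of_mem_enumerate hp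
          constructor
          · intro hcp; exact ⟨(hmem.1 hcp).1, Or.inl rfl⟩
          · intro hsp
            refine hmem.2 ⟨hsp.1, Or.inr ?_⟩
            rw [hfst]
            intro hcontr
            have : s = p.1 := by injection hcontr
            omega)
    · have hfst : spdxFirst s (l :: ls) = spdxFirst (s + 1) ls := by simp [spdxFirst, h]
      have hc : ¬ PySem.Set.contains D s = true := fun hcT => h (hhead.1 hcT).1
      rw [List.filter_cons_of_pos (by simp; exact fun hm => hc ((PySem.Set.contains_iff D s).2 hm)), List.map_cons]
      rw [keepA_cons_not_spdx l ls seen h]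
      refine congrArg (fun t => l :: t) ?_
      exact ih (s + 1) D seen (fun p hp => by
        have hmem := hD p (List.mem_cons_of_mem _ hp)
        rw [hfst] at hmem
        exact hmem)

-- the SPDX index list, as B computes it
def spdxIdx (ls : List String) (s : Int) : List Int :=
  ((PySem.List.enumerate ls s).filter (fun p => pvIsSpdx p.2)).map (fun p => p.1)

lemma spdxIdx_pairwise (ls : List String) (s : Int) : (spdxIdx ls s).Pairwise (· < ·) := by
  unfold spdxIdx
  exact List.Pairwise.map _ (fun a b h => h)
    ((PySem.List.pairwise_lt_enumerate ls s).filter _)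

lemma head?_spdxIdx (ls : List String) : ∀ s, (spdxIdx ls s).head? = spdxFirst s ls := by
  induction ls with
  | nil => intro s; simp [spdxIdx, spdxFirst, PySem.List.enumerate_nil]
  | cons l ls ih =>
    intro s
    by_cases h : pvIsSpdx l = true
    · simp [spdxIdx, spdxFirst, PySem.List.enumerate_cons, h]
    · simpa [spdxIdx, spdxFirst, PySem.List.enumerate_cons, h] using ih (s + 1)

lemma mem_spdxIdx {ls : List String} {s : Int} {p : Int × String}
    (hp : p ∈ PySem.List.enumerate ls s) : p.1 ∈ spdxIdx ls s ↔ pvIsSpdx p.2 = true := by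
  constructor
  · intro hmem
    rcases List.mem_map.1 hmem with ⟨q, hq, hq1⟩
    rcases List.mem_filter.1 hq with ⟨hqmem, hqS⟩
    rcases (PySem.List.mem_enumerate_iff ls s p).1 hp with ⟨k, hk, rfl⟩
    rcases (PySem.List.mem_enumerate_iff ls s q).1 hqmem with ⟨k', hk', rfl⟩
    have : k' = k := by simp at hq1; omega
    subst this
    simpa using hqS
  · intro hS
    exact List.mem_map.2 ⟨p, List.mem_filter.2 ⟨hp, hS⟩, rfl⟩

lemma mem_tail_iff_of_pairwise {xs : List Int} (h : xs.Pairwise (· < ·)) (x : Int) :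
    x ∈ xs.tail ↔ x ∈ xs ∧ xs.head? ≠ some x := by
  cases xs with
  | nil => simp
  | cons a t =>
    simp only [List.tail_cons, List.head?_cons, List.mem_cons]
    constructor
    · intro hx
      refine ⟨Or.inr hx, ?_⟩
      intro hax
      have ha : a = x := by injection hax
      subst ha
      have := (List.pairwise_cons.1 h).1 a hx
      omega
    · rintro ⟨hx | hx, hne⟩
      · exact absurd (by rw [hx]) hne
      · exact hx

lemma keepA_eq_alt_list (ls : List String) :
    ((ls.foldl
      (fun (st : Bool × List String) line =>
        if pvIsSpdx line then
          if st.1 then st else (true, st.2 ++ [line])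
        else (st.1, st.2 ++ [line]))
      (false, [])).2 : List String) =
    ((PySem.List.enumerate ls).filter
        (fun p => !(PySem.Set.contains
          (PySem.Set.ofList (PySem.List.slice (spdxIdx ls 0) (some 1) none)) p.1))).map
      (fun p => p.2) := by
  rw [foldA_eq_keepA ls false [], List.nil_append]
  refine (filter_drop_eq_keepA ls 0 _ false ?_).symm
  intro p hp
  rw [PySem.List.slice_from_one, PySem.Set.contains_iff, PySem.Set.mem_ofList,
    mem_tail_iff_of_pairwise (spdxIdx_pairwise ls 0), head?_spdxIdx ls 0, mem_spdxIdx hp]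
  simp

-- ===== VERDICT (by name: the statement is the Claim_ definition above) =====
theorem remove_duplicate_spdx_spec : Claim_equal_remove_duplicate_spdx := by
  intro source _
  unfold Spec_remove_duplicate_spdx remove_duplicate_spdx remove_duplicate_spdx_alt
  simp only
  rw [← spdxIdx, keepA_eq_alt_list]
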